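-- pv_equiv track=rewrite | github.com/to-be-pass/python-coding-test | src/dayaelee/ch_08/solution_019.py | solution
-- ===== SOURCE A (Python) =====
-- def solution(string_list, query_list):
--     # 각 쿼리 리스트에 있는 문자열이 stringList의 문자열 리스트에 있는지 여부를 확인해야함
--
--     hashtable = [0] * (len(string_list))
--
--     # 해시 테이블 생성, string_list가 들어있음
--     for i in range(len(string_list)):
--         hashtable[i] = hashing(string_list[i])
--
--     result = []
--
--     for i in range(len(query_list)):
--         if hashing(query_list[i]) in hashtable:
--             result.append(True)
--         else:
--             result.append(False)
--     return result
--
-- def hashing(string):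
--
--     m = 1_000_000_007
--     sum = 0
--     for i in range(len(string)):
--         if i == 0:
--             sum += ord(string[i])
--         else:
--             sum += ord(string[i]) * (31**i)
--
--     sum = sum % m
--     return sum
-- ===== SOURCE B (Python) =====
-- def solution(string_list, query_list):
--     m = 1_000_000_007
--
--     def h(s):
--         # Horner's rule over the reversed string: same polynomial hash as A
--         acc = 0
--         for c in reversed(s):
--             acc = (acc * 31 + ord(c)) % m
--         return acc
--
--     hs = sorted(h(s) for s in string_list)
--
--     def found(x):
--         # binary search (lower bound) in the sorted hash list
--         lo, hi = 0, len(hs)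
--         while lo < hi:
--             mid = (lo + hi) // 2
--             if hs[mid] < x:
--                 lo = mid + 1
--             else:
--                 hi = mid
--         return lo < len(hs) and hs[lo] == x
--
--     return [found(h(q)) for q in query_list]
-- ===== Notes on version B (the rewrite author's own statement) =====
-- stated objective: faster
-- what changed: B computes each hash by a Horner rolling accumulator instead of summing ord(c)*31**i with explicit big-integer powers, sorts the string hashes once, and answers each query by a hand-written binary search on the sorted list instead of A's linear 'in' scan of the hash table per query.
import Mathlib
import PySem

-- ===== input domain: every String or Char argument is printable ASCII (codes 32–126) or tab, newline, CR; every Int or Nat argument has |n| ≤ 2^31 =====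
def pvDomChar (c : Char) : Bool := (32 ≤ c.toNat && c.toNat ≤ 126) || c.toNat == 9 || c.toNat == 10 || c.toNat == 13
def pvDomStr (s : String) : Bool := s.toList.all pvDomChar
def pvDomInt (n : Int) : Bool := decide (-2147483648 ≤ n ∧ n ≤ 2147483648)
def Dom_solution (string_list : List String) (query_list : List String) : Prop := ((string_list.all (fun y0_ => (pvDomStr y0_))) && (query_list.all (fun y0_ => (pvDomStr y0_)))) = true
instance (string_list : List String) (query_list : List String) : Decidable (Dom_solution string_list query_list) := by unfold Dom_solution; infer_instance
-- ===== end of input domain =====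

-- B replaces A's per-index-power hash by a Horner rolling accumulator, sorts the string
-- hashes once, and answers each query by binary search instead of a linear scan
-- (objective: faster; same results).

-- ===== PORT A =====
-- literal port of A's helper 'hashing'
def pvHashing (s : String) : Int :=
  let cs := s.toList
  let sum := (PySem.List.pyRange 0 (cs.length : Int) 1).foldl
    (fun acc i =>
      if i = 0 then acc + ((PySem.List.pyGetD cs i ' ').toNat : Int)
      else acc + ((PySem.List.pyGetD cs i ' ').toNat : Int) * 31 ^ i.toNat) 0
  PySem.Int.mod sum 1000000007

def solution (string_list : List String) (query_list : List String) : List Bool :=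
  (PySem.List.pyRange 0 (query_list.length : Int) 1).foldl
    (fun res i =>
      if ((PySem.List.pyRange 0 (string_list.length : Int) 1).foldl
            (fun ht j => PySem.List.pySetD ht j (pvHashing (PySem.List.pyGetD string_list j "")))
            (List.replicate string_list.length 0)).contains
          (pvHashing (PySem.List.pyGetD query_list i "")) then res ++ [true]
      else res ++ [false]) []

-- ===== PORT B =====
-- B's helper 'h': acc = (acc*31 + ord(c)) % m over the reversed string
def pvHorner (s : String) : Int :=
  s.toList.reverse.foldl (fun acc c => PySem.Int.mod (acc * 31 + (c.toNat : Int)) 1000000007) 0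

-- B's while loop in 'found': lower-bound binary search; hs[mid] is exact as
-- List.getD since 0 ≤ lo ≤ mid < hi ≤ len(hs) at every access
def pvBSearch (hs : List Int) (x : Int) (lo hi : Nat) : Nat :=
  if lo < hi then
    let mid := (lo + hi) / 2
    if hs.getD mid 0 < x then pvBSearch hs x (mid + 1) hi
    else pvBSearch hs x lo mid
  else lo
termination_by hi - lo
decreasing_by all_goals omega

-- B's 'found': lo < len(hs) and hs[lo] == x (the getD is guarded by the length test)
def pvFound (hs : List Int) (x : Int) : Bool :=
  let l := pvBSearch hs x 0 hs.length
  decide (l < hs.length) && decide (hs.getD l 0 = x)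

def solution_alt (string_list : List String) (query_list : List String) : List Bool :=
  let hs := PySem.List.sorted (string_list.map pvHorner) (fun z => z) false
  query_list.map (fun q => pvFound hs (pvHorner q))

-- ===== PRECONDITION & SPEC =====
def Spec_solution (string_list : List String) (query_list : List String) (out : List Bool) : Prop := out = solution_alt string_list query_list
instance (string_list : List String) (query_list : List String) (out : List Bool) : Decidable (Spec_solution string_list query_list out) := by unfold Spec_solution; infer_instance

-- ===== CLAIM (what is proved, stated in full; the proofs are below) =====
def Claim_equal_solution : Prop := ∀ (string_list : List String) (query_list : List String), Dom_solution string_list query_list → Spec_solution string_list query_list (solution string_list query_list)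

-- ===== LEMMAS AND PROOFS =====

-- the (un-modded) polynomial sum_i ord(cs[i]) * 31^i, as a foldr
def pvPoly (cs : List Char) : Int :=
  cs.foldr (fun c a => (c.toNat : Int) + 31 * a) 0

theorem pvPoly_append_singleton (cs : List Char) (c : Char) :
    pvPoly (cs ++ [c]) = pvPoly cs + 31 ^ cs.length * (c.toNat : Int) := by
  induction cs with
  | nil => simp [pvPoly]
  | cons d t ih => simp [pvPoly] at ih ⊢; rw [ih]; ring

-- A's hashing loop computes the polynomial sum
theorem pvHashing_sum (cs : List Char) :
    (PySem.List.pyRange 0 (cs.length : Int) 1).foldl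
      (fun acc i =>
        if i = 0 then acc + ((PySem.List.pyGetD cs i ' ').toNat : Int)
        else acc + ((PySem.List.pyGetD cs i ' ').toNat : Int) * 31 ^ i.toNat) 0 = pvPoly cs := by
  induction cs using List.reverseRecOn with
  | nil => simp [PySem.List.pyRange_one_eq_nil, pvPoly]
  | append_singleton t c ih =>
    have hlen : ((t ++ [c]).length : Int) = (t.length : Int) + 1 := by
      simp
    rw [hlen, PySem.List.pyRange_one_succ_right (Int.natCast_nonneg _), List.foldl_append]
    have hcongr :
        (PySem.List.pyRange 0 (t.length : Int) 1).foldl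
          (fun acc i =>
            if i = 0 then acc + ((PySem.List.pyGetD (t ++ [c]) i ' ').toNat : Int)
            else acc + ((PySem.List.pyGetD (t ++ [c]) i ' ').toNat : Int) * 31 ^ i.toNat) 0
        = (PySem.List.pyRange 0 (t.length : Int) 1).foldl
          (fun acc i =>
            if i = 0 then acc + ((PySem.List.pyGetD t i ' ').toNat : Int)
            else acc + ((PySem.List.pyGetD t i ' ').toNat : Int) * 31 ^ i.toNat) 0 := by
      apply PySem.List.foldl_congr_mem
      intro acc i hi
      rw [PySem.List.mem_pyRange_one] at hi
      have h1 : i < ((t ++ [c]).length : Int) := by simp; omega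
      have hget : PySem.List.pyGetD (t ++ [c]) i ' ' = PySem.List.pyGetD t i ' ' := by
        rw [PySem.List.pyGetD_eq_getElem (t ++ [c]) ' ' hi.1 h1,
            PySem.List.pyGetD_eq_getElem t ' ' hi.1 hi.2]
        exact List.getElem_append_left (by omega)
      rw [hget]
    rw [hcongr, ih]
    have hgetc : PySem.List.pyGetD (t ++ [c]) (t.length : Int) ' ' = c := by
      rw [PySem.List.pyGetD_eq_getElem (t ++ [c]) ' ' (Int.natCast_nonneg _) (by simp)]
      simp
    simp only [List.foldl_cons, List.foldl_nil, hgetc]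
    rw [pvPoly_append_singleton]
    by_cases h0 : (t.length : Int) = 0
    · have ht : t.length = 0 := by exact_mod_cast h0
      simp [ht]
    · rw [if_neg h0]
      simp only [Int.toNat_natCast]
      ring

-- one Horner step absorbs an inner 'mod m'
theorem pvMod_absorb (x c : Int) :
    PySem.Int.mod (PySem.Int.mod x 1000000007 * 31 + c) 1000000007
      = PySem.Int.mod (x * 31 + c) 1000000007 := by
  simp only [PySem.Int.mod_eq_emod_of_pos (show (0:Int) < 1000000007 by decide)]
  conv_rhs => rw [Int.add_emod, Int.mul_emod]
  conv_lhs => rw [Int.add_emod, Int.mul_emod, Int.emod_emod_of_dvd _ dvd_rfl]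

-- B's Horner loop computes the polynomial sum mod m
theorem pvHorner_loop (cs : List Char) (acc : Int) :
    cs.reverse.foldl (fun a c => PySem.Int.mod (a * 31 + (c.toNat : Int)) 1000000007)
        (PySem.Int.mod acc 1000000007)
      = PySem.Int.mod (acc * 31 ^ cs.length + pvPoly cs) 1000000007 := by
  induction cs generalizing acc with
  | nil => simp [pvPoly]
  | cons c t ih =>
    simp only [List.reverse_cons, List.foldl_append, List.foldl_cons, List.foldl_nil]
    rw [ih, pvMod_absorb]
    congr 1
    simp [pvPoly, pow_succ]
    ring

theorem pvHash_eq (s : String) : pvHashing s = pvHorner s := by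
  simp only [pvHashing, pvHorner]
  rw [pvHashing_sum]
  have := pvHorner_loop s.toList 0
  simpa using this.symm

-- the hashtable-building loop produces the map of hashes (with any untouched tail)
theorem pvBuild (xs : List String) (tail : List Int) :
    (PySem.List.pyRange 0 (xs.length : Int) 1).foldl
      (fun ht i => PySem.List.pySetD ht i (pvHashing (PySem.List.pyGetD xs i "")))
      (List.replicate xs.length 0 ++ tail) = xs.map pvHashing ++ tail := by
  induction xs using List.reverseRecOn generalizing tail with
  | nil => simp [PySem.List.pyRange_one_eq_nil]
  | append_singleton t x ih =>
    have hlen : ((t ++ [x]).length : Int) = (t.length : Int) + 1 := by simp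
    rw [hlen, PySem.List.pyRange_one_succ_right (Int.natCast_nonneg _), List.foldl_append]
    have hrep : List.replicate (t ++ [x]).length (0 : Int) ++ tail
        = List.replicate t.length 0 ++ ((0 : Int) :: tail) := by
      simp [List.replicate_succ']
    rw [hrep]
    have hcongr :
        (PySem.List.pyRange 0 (t.length : Int) 1).foldl
          (fun ht i => PySem.List.pySetD ht i (pvHashing (PySem.List.pyGetD (t ++ [x]) i "")))
          (List.replicate t.length 0 ++ ((0 : Int) :: tail))
        = (PySem.List.pyRange 0 (t.length : Int) 1).foldl
          (fun ht i => PySem.List.pySetD ht i (pvHashing (PySem.List.pyGetD t i "")))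
          (List.replicate t.length 0 ++ ((0 : Int) :: tail)) := by
      apply PySem.List.foldl_congr_mem
      intro acc i hi
      rw [PySem.List.mem_pyRange_one] at hi
      have h1 : i < ((t ++ [x]).length : Int) := by simp; omega
      have hget : PySem.List.pyGetD (t ++ [x]) i "" = PySem.List.pyGetD t i "" := by
        rw [PySem.List.pyGetD_eq_getElem (t ++ [x]) "" hi.1 h1,
            PySem.List.pyGetD_eq_getElem t "" hi.1 hi.2]
        exact List.getElem_append_left (by omega)
      rw [hget]
    rw [hcongr, ih]
    have hgetx : PySem.List.pyGetD (t ++ [x]) (t.length : Int) "" = x := by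
      rw [PySem.List.pyGetD_eq_getElem (t ++ [x]) "" (Int.natCast_nonneg _) (by simp)]
      simp
    simp only [List.foldl_cons, List.foldl_nil]
    rw [hgetx, PySem.List.pySetD_natCast]
    rw [List.set_append]
    simp

-- binary-search invariant: on a ≤-sorted list, everything strictly left of the
-- returned index is < x and everything from it on is ≥ x
theorem pvBSearch_inv (hs : List Int) (x : Int) (hp : List.Pairwise (· ≤ ·) hs) :
    ∀ (lo hi : Nat), lo ≤ hi → hi ≤ hs.length →
    (∀ i, i < lo → hs.getD i 0 < x) →
    (∀ i, hi ≤ i → i < hs.length → x ≤ hs.getD i 0) →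
    (∀ i, i < pvBSearch hs x lo hi → hs.getD i 0 < x) ∧
    (∀ i, pvBSearch hs x lo hi ≤ i → i < hs.length → x ≤ hs.getD i 0) ∧
    pvBSearch hs x lo hi ≤ hs.length := by
  have hmono : ∀ i j, i ≤ j → j < hs.length → hs.getD i 0 ≤ hs.getD j 0 := by
    intro i j hij hj
    rcases Nat.eq_or_lt_of_le hij with rfl | hlt
    · exact le_refl _
    · rw [List.getD_eq_getElem hs 0 (by omega), List.getD_eq_getElem hs 0 hj]
      exact List.pairwise_iff_getElem.mp hp i j (by omega) hj hlt
  intro lo hi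
  induction hn : hi - lo using Nat.strong_induction_on generalizing lo hi with
  | _ n ih =>
  intro hle hlen hlow hhigh
  rw [pvBSearch]
  by_cases hlt : lo < hi
  · rw [if_pos hlt]
    set mid := (lo + hi) / 2 with hmid
    have hmlt : mid < hi := by omega
    have hmlo : lo ≤ mid := by omega
    by_cases hc : hs.getD mid 0 < x
    · rw [if_pos hc]
      exact ih (hi - (mid + 1)) (by omega) (mid + 1) hi rfl (by omega) hlen
        (fun i hi' => lt_of_le_of_lt (hmono i mid (by omega) (by omega)) hc) hhigh
    · rw [if_neg hc]
      exact ih (mid - lo) (by omega) lo mid rfl hmlo (by omega) hlow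
        (fun i h1 h2 => le_trans (not_lt.mp hc) (hmono mid i h1 h2))
  · rw [if_neg hlt]
    have : lo = hi := by omega
    exact ⟨hlow, fun i h1 h2 => hhigh i (by omega) h2, by omega⟩

-- on a ≤-sorted list, B's 'found' decides membership
theorem pvFound_eq_contains (hs : List Int) (x : Int) (hp : List.Pairwise (· ≤ ·) hs) :
    pvFound hs x = hs.contains x := by
  obtain ⟨h1, h2, h3⟩ := pvBSearch_inv hs x hp 0 hs.length (Nat.zero_le _) (le_refl _)
    (by omega) (by omega)
  set l := pvBSearch hs x 0 hs.length with hl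
  unfold pvFound
  rw [← hl]
  by_cases hmem : x ∈ hs
  · obtain ⟨i, hi, hix⟩ := List.getElem_of_mem hmem
    have hgi : hs.getD i 0 = x := by rw [List.getD_eq_getElem hs 0 hi, hix]
    have hil : l ≤ i := by
      by_contra hcon
      exact absurd (h1 i (by omega)) (by rw [hgi]; exact lt_irrefl x)
    have hllen : l < hs.length := by omega
    have hgl : hs.getD l 0 = x := by
      have hle1 := h2 l (le_refl _) hllen
      have hle2 : hs.getD l 0 ≤ hs.getD i 0 := by
        rw [List.getD_eq_getElem hs 0 hllen, List.getD_eq_getElem hs 0 hi]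
        rcases Nat.eq_or_lt_of_le hil with rfl | hlt
        · exact le_refl _
        · exact List.pairwise_iff_getElem.mp hp l i hllen hi hlt
      omega
    rw [List.getD_eq_getElem hs 0 hllen] at hgl
    simp [hllen, hgl, List.contains_eq_mem, hmem]
  · have hnf : ¬ (l < hs.length ∧ hs.getD l 0 = x) := by
      rintro ⟨hllen, hgl⟩
      rw [List.getD_eq_getElem hs 0 hllen] at hgl
      exact hmem (hgl ▸ List.getElem_mem hllen)
    simp only [List.contains_eq_mem] at *
    rw [Bool.eq_iff_iff]
    simp [hmem]
    intro hllen hgl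
    exact hnf ⟨hllen, hgl⟩

-- ===== VERDICT (by name: the statement is the Claim_ definition above) =====
theorem solution_spec : Claim_equal_solution := by
  intro string_list query_list _
  unfold Spec_solution solution solution_alt
  have hbuild := pvBuild string_list []
  simp only [List.append_nil] at hbuild
  rw [hbuild]
  have hif : ∀ (res : List Bool) (b : Bool),
      (if b = true then res ++ [true] else res ++ [false]) = res ++ [b] := by
    intro res b; cases b <;> simp
  have hcongr :
      (PySem.List.pyRange 0 (query_list.length : Int) 1).foldl
        (fun res i =>
          if (string_list.map pvHashing).contains (pvHashing (PySem.List.pyGetD query_list i "")) then res ++ [true]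
          else res ++ [false]) []
      = (PySem.List.pyRange 0 (query_list.length : Int) 1).foldl
        (fun res i =>
          res ++ [(string_list.map pvHashing).contains (pvHashing (PySem.List.pyGetD query_list i ""))]) [] := by
    apply PySem.List.foldl_congr_mem
    intro acc i _
    exact hif acc _
  rw [hcongr, PySem.List.foldl_append_singleton_eq_map, List.nil_append]
  have hmap :
      (PySem.List.pyRange 0 (query_list.length : Int) 1).map
        (fun i => (string_list.map pvHashing).contains (pvHashing (PySem.List.pyGetD query_list i "")))
      = query_list.map
        (fun q => (string_list.map pvHashing).contains (pvHashing q)) := by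
    rw [show (fun i => (string_list.map pvHashing).contains (pvHashing (PySem.List.pyGetD query_list i "")))
        = (fun q => (string_list.map pvHashing).contains (pvHashing q)) ∘ (fun i => PySem.List.pyGetD query_list i "") from rfl,
       ← List.map_map, PySem.List.map_pyGetD_pyRange_zero' query_list ""]
  rw [hmap]
  apply List.map_congr_left
  intro q _
  rw [pvHash_eq, show string_list.map pvHashing = string_list.map pvHorner from
        List.map_congr_left (fun s _ => pvHash_eq s)]
  have hp : List.Pairwise (· ≤ ·)
      (PySem.List.sorted (string_list.map pvHorner) (fun z => z) false) :=
    PySem.List.sorted_pairwise _ _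
  rw [pvFound_eq_contains _ _ hp]
  simp only [List.contains_eq_mem]
  rw [decide_eq_decide]
  exact (PySem.List.mem_sorted _ _ _ _).symm
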